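-- pv_equiv track=rewrite | github.com/Saichandrasekh/RAG | app.py | sort_chunks_by_document_order
-- ===== SOURCE A (Python) =====
-- def sort_chunks_by_document_order(chunks: list) -> list:
--     """
--     Group chunks by source, then within each source sort by the numeric
--     suffix of the chunk_id (document order). Sources are ordered by the
--     rank of their first-appearing chunk (best relevance first).
--     """
--     source_order = []
--     source_chunks = {}
--     for c in chunks:
--         src = c["source"]
--         if src not in source_chunks:
--             source_chunks[src] = []
--             source_order.append(src)
--         source_chunks[src].append(c)
--
--     result = []
--     for src in source_order:
--         group = source_chunks[src]
--         def sort_key(c):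
--             cid = c.get("chunk_id", "")
--             if cid:
--                 parts = cid.rsplit("_chunk_", 1)
--                 if len(parts) == 2:
--                     try:
--                         return int(parts[1])
--                     except ValueError:
--                         pass
--             return 0
--         group.sort(key=sort_key)
--         result.extend(group)
--
--     return result
-- ===== SOURCE B (Python) =====
-- def sort_chunks_by_document_order(chunks: list) -> list:
--     """Same result as A: distinct sources in first-appearance order, then a
--     per-source stable sort by the numeric chunk_id suffix, as one comprehension
--     over filtered scans instead of a one-pass bucket dict."""
--     def suffix(c):
--         _, sep, tail = c.get("chunk_id", "").rpartition("_chunk_")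
--         if sep:
--             try:
--                 return int(tail)
--             except ValueError:
--                 return 0
--         return 0
--
--     order = dict.fromkeys(c["source"] for c in chunks)
--     return [c for s in order
--               for c in sorted((d for d in chunks if d["source"] == s), key=suffix)]
-- ===== Notes on version B (the rewrite author's own statement) =====
-- stated objective: simpler
-- what changed: Replaces A's one-pass bucket dict plus per-group in-place sorts with a dict.fromkeys pass for the source order and a single comprehension that, per source, sorts a filtered scan of the input; the suffix key uses rpartition instead of rsplit.
import Mathlib
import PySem

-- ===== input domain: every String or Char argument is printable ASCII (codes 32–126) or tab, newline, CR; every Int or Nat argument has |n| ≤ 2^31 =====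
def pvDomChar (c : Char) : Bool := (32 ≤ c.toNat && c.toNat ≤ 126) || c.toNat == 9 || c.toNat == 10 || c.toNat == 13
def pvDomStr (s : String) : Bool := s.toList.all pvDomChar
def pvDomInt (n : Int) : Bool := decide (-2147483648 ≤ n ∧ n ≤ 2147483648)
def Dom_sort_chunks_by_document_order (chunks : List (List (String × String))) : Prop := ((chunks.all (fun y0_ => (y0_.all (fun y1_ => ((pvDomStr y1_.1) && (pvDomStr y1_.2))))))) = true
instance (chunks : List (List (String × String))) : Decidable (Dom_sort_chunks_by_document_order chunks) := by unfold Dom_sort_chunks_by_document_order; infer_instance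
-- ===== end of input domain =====

-- B replaces A's one-pass bucket-dict grouping + per-group in-place sorts with a dedup
-- of the source column and one sorted filtered scan per distinct source (simpler decomposition).
-- Pre_ excludes inputs where a chunk lacks the "source" key, on which A raises KeyError.


-- ===== PORT A =====
-- c["source"]; total rendering with default "" — Pre_ excludes the KeyError inputs
def pvSrc (c : List (String × String)) : String :=
  (PySem.Dict.mk c).getD "source" ""

-- A's sort_key: cid.rsplit("_chunk_", 1) ported by hand via the last occurrence
-- (PySem.Str.rfind is exact); int(parts[1]) is PySem.Int.ofStr?, ValueError -> 0.
def pvSortKeyA (c : List (String × String)) : Int :=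
  let cid := (PySem.Dict.mk c).getD "chunk_id" ""
  if cid ≠ "" then
    let i := PySem.Str.rfind cid "_chunk_"
    let parts := if i = -1 then [cid]
      else [PySem.Str.slice cid (some 0) (some i), PySem.Str.slice cid (some (i + 7)) none]
    if parts.length = 2 then
      match PySem.Int.ofStr? (PySem.List.pyGetD parts 1 "") with
      | some n => n
      | none => 0
    else 0
  else 0

-- the body of A's first loop: (source_order, source_chunks) updated by one chunk
def pvStepA (st : List String × PySem.Dict String (List (List (String × String))))
    (c : List (String × String)) :
    List String × PySem.Dict String (List (List (String × String))) :=
  let src := pvSrc c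
  let st := if st.2.contains src then st else (st.1 ++ [src], st.2.insert src [])
  (st.1, st.2.modify src [] (fun g => g ++ [c]))

def sort_chunks_by_document_order (chunks : List (List (String × String))) : List (List (String × String)) :=
  let st := chunks.foldl pvStepA ([], PySem.Dict.mk [])
  st.1.foldl (fun result src => result ++ PySem.List.sorted (st.2.getD src []) pvSortKeyA false) []

-- ===== PORT B =====
-- B's suffix: cid.rpartition("_chunk_") — sep empty (rfind = -1) -> 0, else int(tail), ValueError -> 0
def pvSuffixB (c : List (String × String)) : Int :=
  let cid := (PySem.Dict.mk c).getD "chunk_id" ""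
  let i := PySem.Str.rfind cid "_chunk_"
  if i = -1 then 0
  else (PySem.Int.ofStr? (PySem.Str.slice cid (some (i + 7)) none)).getD 0

-- order = dict.fromkeys(sources); one comprehension: per source, sorted filtered scan
def sort_chunks_by_document_order_alt (chunks : List (List (String × String))) : List (List (String × String)) :=
  (PySem.List.dedup (chunks.map pvSrc)).flatMap
    (fun s => PySem.List.sorted (chunks.filter (fun c => pvSrc c == s)) pvSuffixB false)

-- ===== PRECONDITION & SPEC =====
-- Pre_ excludes exactly the inputs where some chunk has no "source" key: there A (and B) raise KeyError.
def Pre_sort_chunks_by_document_order (chunks : List (List (String × String))) : Prop :=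
  ∀ c ∈ chunks, (PySem.Dict.mk c).contains "source" = true
instance (chunks : List (List (String × String))) : Decidable (Pre_sort_chunks_by_document_order chunks) := by unfold Pre_sort_chunks_by_document_order; infer_instance

def pvWitness_sort_chunks_by_document_order : (List (List (String × String))) :=
  [[("source", "a"), ("chunk_id", "a_chunk_2")],
   [("source", "b"), ("chunk_id", "b_chunk_1")],
   [("source", "a"), ("chunk_id", "a_chunk_1")]]

def Spec_sort_chunks_by_document_order (chunks : List (List (String × String))) (out : List (List (String × String))) : Prop := out = sort_chunks_by_document_order_alt chunks
instance (chunks : List (List (String × String))) (out : List (List (String × String))) : Decidable (Spec_sort_chunks_by_document_order chunks out) := by unfold Spec_sort_chunks_by_document_order; infer_instance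

-- ===== CLAIM (what is proved, stated in full; the proofs are below) =====
def Claim_equal_sort_chunks_by_document_order : Prop := ∀ (chunks : List (List (String × String))), Dom_sort_chunks_by_document_order chunks → Pre_sort_chunks_by_document_order chunks → Spec_sort_chunks_by_document_order chunks (sort_chunks_by_document_order chunks)

-- ===== LEMMAS AND PROOFS =====

-- A's grouping loop, characterised: the order list is the running dedup of the sources,
-- and each bucket is the filter of the processed chunks by that source.
theorem pv_loop_inv (l : List (List (String × String)))
    (order : List String) (d : PySem.Dict String (List (List (String × String))))
    (hinv : ∀ s, d.contains s = order.contains s) :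
    (l.foldl pvStepA (order, d)).1 = (l.map pvSrc).foldl PySem.Set.add order ∧
    ∀ s, (l.foldl pvStepA (order, d)).2.getD s [] =
      d.getD s [] ++ l.filter (fun c => pvSrc c == s) := by
  induction l generalizing order d with
  | nil => simp
  | cons c l ih =>
    simp only [List.foldl_cons, List.map_cons, List.filter_cons]
    by_cases h : d.contains (pvSrc c)
    · have horder : order.contains (pvSrc c) = true := by rw [← hinv]; exact h
      have hmem : pvSrc c ∈ order := by simpa using horder
      have hstep : pvStepA (order, d) c = (order, d.modify (pvSrc c) [] fun g => g ++ [c]) := by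
        simp [pvStepA, h]
      rw [hstep]
      have hadd : PySem.Set.add order (pvSrc c) = order := by
        simp [PySem.Set.add, PySem.Set.contains, hmem]
      rw [hadd]
      have hinv' : ∀ s, (d.modify (pvSrc c) [] fun g => g ++ [c]).contains s = order.contains s := by
        intro s
        rw [PySem.Dict.contains_modify]
        by_cases hs : s = pvSrc c
        · simp [hs, hmem]
        · simp [hinv s, beq_eq_false_iff_ne.mpr hs]
      obtain ⟨h1, h2⟩ := ih order _ hinv'
      refine ⟨h1, fun s => ?_⟩
      rw [h2 s, PySem.Dict.getD_modify]
      by_cases hs : s = pvSrc c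
      · subst hs; simp
      · rw [if_neg hs, beq_eq_false_iff_ne.mpr (fun hh => hs hh.symm)]
        simp
    · have horder : order.contains (pvSrc c) = false := by rw [← hinv]; simpa using h
      have hnmem : pvSrc c ∉ order := by simpa using horder
      have hstep : pvStepA (order, d) c =
          (order ++ [pvSrc c], (d.insert (pvSrc c) []).modify (pvSrc c) [] fun g => g ++ [c]) := by
        simp [pvStepA, h]
      rw [hstep]
      have hadd : PySem.Set.add order (pvSrc c) = order ++ [pvSrc c] := by
        simp [PySem.Set.add, PySem.Set.contains, hnmem]
      rw [hadd]
      have hinv' : ∀ s, ((d.insert (pvSrc c) []).modify (pvSrc c) [] fun g => g ++ [c]).contains s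
          = (order ++ [pvSrc c]).contains s := by
        intro s
        rw [PySem.Dict.contains_modify, PySem.Dict.contains_insert]
        by_cases hs : s = pvSrc c
        · simp [hs]
        · simp [hinv s, beq_eq_false_iff_ne.mpr hs, hs]
      obtain ⟨h1, h2⟩ := ih _ _ hinv'
      refine ⟨h1, fun s => ?_⟩
      rw [h2 s, PySem.Dict.getD_modify]
      by_cases hs : s = pvSrc c
      · have hd : d.getD (pvSrc c) [] = [] :=
          PySem.Dict.getD_of_not_contains _ _ (by simpa using h)
        subst hs; simp [hd]
      · rw [if_neg hs, PySem.Dict.getD_insert, if_neg hs,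
          beq_eq_false_iff_ne.mpr (fun hh => hs hh.symm)]
        simp

theorem pv_pyGetD_pair (a b : String) : PySem.List.pyGetD [a, b] 1 "" = b := rfl

-- the two sort keys are the same function
theorem pv_key_eq : pvSortKeyA = pvSuffixB := by
  funext c
  unfold pvSortKeyA pvSuffixB
  by_cases hc : (PySem.Dict.mk c).getD "chunk_id" "" = ""
  · rw [hc]
    norm_num
    decide
  · simp only [hc, ne_eq, not_false_eq_true, if_true]
    by_cases hi : PySem.Str.rfind ((PySem.Dict.mk c).getD "chunk_id" "") "_chunk_" = -1
    · simp only [if_pos hi]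
      norm_num
    · simp only [if_neg hi]
      rw [pv_pyGetD_pair]
      cases PySem.Int.ofStr? (PySem.Str.slice ((PySem.Dict.mk c).getD "chunk_id" "")
        (some (PySem.Str.rfind ((PySem.Dict.mk c).getD "chunk_id" "") "_chunk_" + 7)) none) <;> rfl

theorem pv_getD_mkNil (s : String) :
    (PySem.Dict.mk ([] : List (String × List (List (String × String))))).getD s [] = [] := rfl

theorem pv_main_eq (chunks : List (List (String × String))) :
    sort_chunks_by_document_order chunks = sort_chunks_by_document_order_alt chunks := by
  unfold sort_chunks_by_document_order sort_chunks_by_document_order_alt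
  obtain ⟨h1, h2⟩ := pv_loop_inv chunks [] (PySem.Dict.mk []) (by intro s; rfl)
  rw [PySem.List.foldl_append_eq_flatMap
    (g := fun src => PySem.List.sorted ((chunks.foldl pvStepA ([], PySem.Dict.mk [])).2.getD src []) pvSortKeyA false)]
  simp only [List.nil_append, h1, h2, pv_key_eq, pv_getD_mkNil,
    ← PySem.Set.ofList_eq_foldl, PySem.List.dedup_eq_ofList]

-- ===== VERDICT (by name: the statement is the Claim_ definition above) =====
theorem sort_chunks_by_document_order_spec : Claim_equal_sort_chunks_by_document_order := by
  intro chunks _ _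
  unfold Spec_sort_chunks_by_document_order
  exact pv_main_eq chunks
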